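-- pv_equiv track=rewrite | github.com/autoppia/autoppia_iwa | autoppia_iwa/src/demo_webs/projects/cinema_1/replace_functions.py | contact_replace_func
-- ===== SOURCE A (Python) =====
-- def contact_replace_func(text: str) -> str:
--     """Replace placeholders for contact form fields with specific values."""
--     if not isinstance(text, str):
--         return text
--
--     replacements = {
--         "<name>": "John Doe",
--         "<email>": "johndoe@example.com",
--         "<subject>": "Inquiry about services",
--         "<message>": "I would like more details about your offerings. Please get back to me soon.",
--     }
--
--     for placeholder, value in replacements.items():
--         text = text.replace(placeholder, value)
--
--     return text
-- ===== SOURCE B (Python) =====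
-- def contact_replace_func(text: str) -> str:
--     """Replace placeholders for contact form fields in a single left-to-right scan."""
--     if not isinstance(text, str):
--         return text
--
--     tokens = (
--         ("<name>", "John Doe"),
--         ("<email>", "johndoe@example.com"),
--         ("<subject>", "Inquiry about services"),
--         ("<message>", "I would like more details about your offerings. Please get back to me soon."),
--     )
--
--     out = []
--     i = 0
--     n = len(text)
--     while i < n:
--         for tok, val in tokens:
--             if text.startswith(tok, i):
--                 out.append(val)
--                 i += len(tok)
--                 break
--         else:
--             out.append(text[i])
--             i += 1
--     return "".join(out)
-- ===== Notes on version B (the rewrite author's own statement) =====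
-- stated objective: alternative
-- what changed: Replaces A's four sequential full-string .replace passes with a single left-to-right scan that tries the four placeholder tokens at each position and emits the replacement directly; safe because the tokens are pairwise non-overlapping and no replacement value contains any token.
import Mathlib
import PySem

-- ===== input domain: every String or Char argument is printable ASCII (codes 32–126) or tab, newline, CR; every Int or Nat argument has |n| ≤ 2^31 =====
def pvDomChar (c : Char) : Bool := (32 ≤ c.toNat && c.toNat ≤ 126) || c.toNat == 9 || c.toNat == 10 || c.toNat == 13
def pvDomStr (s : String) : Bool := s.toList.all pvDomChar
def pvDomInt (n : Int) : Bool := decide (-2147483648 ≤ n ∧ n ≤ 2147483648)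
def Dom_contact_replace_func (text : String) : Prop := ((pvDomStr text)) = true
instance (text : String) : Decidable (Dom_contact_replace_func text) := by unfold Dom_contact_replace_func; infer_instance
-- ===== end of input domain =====

-- B replaces A's four sequential full-string replace passes by ONE left-to-right scan that tries the
-- four placeholder tokens at each position (objective: alternative single-pass algorithm, not timed faster).

-- ===== PORT A =====
-- literal transliteration: the dict's four (placeholder, value) pairs applied by str.replace in insertion order
def contact_replace_func (text : String) : String :=
  let t1 := PySem.Str.replace text "<name>" "John Doe"
  let t2 := PySem.Str.replace t1 "<email>" "johndoe@example.com"
  let t3 := PySem.Str.replace t2 "<subject>" "Inquiry about services"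
  PySem.Str.replace t3 "<message>" "I would like more details about your offerings. Please get back to me soon."

-- ===== PORT B =====
-- the four (token, value) pairs of Source B
def pvTokName : List Char := ['<', 'n', 'a', 'm', 'e', '>']
def pvValName : List Char := "John Doe".toList
def pvTokEmail : List Char := ['<', 'e', 'm', 'a', 'i', 'l', '>']
def pvValEmail : List Char := "johndoe@example.com".toList
def pvTokSubject : List Char := ['<', 's', 'u', 'b', 'j', 'e', 'c', 't', '>']
def pvValSubject : List Char := "Inquiry about services".toList
def pvTokMessage : List Char := ['<', 'm', 'e', 's', 's', 'a', 'g', 'e', '>']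
def pvValMessage : List Char := "I would like more details about your offerings. Please get back to me soon.".toList

-- Source B's while-loop over positions; its inner `for tok, val in tokens: … break / else` over the fixed
-- 4-tuple is transcribed as the four prefix tests in the same order (exact: startswith(tok, i) = token
-- is a prefix of the remaining suffix, and on a match i advances by len(tok), else one char is copied)
def pvScan : List Char → List Char
  | [] => []
  | c :: t =>
    if List.isPrefixOf pvTokName (c :: t) then
      pvValName ++ pvScan ((c :: t).drop pvTokName.length)
    else if List.isPrefixOf pvTokEmail (c :: t) then
      pvValEmail ++ pvScan ((c :: t).drop pvTokEmail.length)
    else if List.isPrefixOf pvTokSubject (c :: t) then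
      pvValSubject ++ pvScan ((c :: t).drop pvTokSubject.length)
    else if List.isPrefixOf pvTokMessage (c :: t) then
      pvValMessage ++ pvScan ((c :: t).drop pvTokMessage.length)
    else
      c :: pvScan t
  termination_by l => l.length
  decreasing_by all_goals simp [pvTokName, pvTokEmail, pvTokSubject, pvTokMessage]

def contact_replace_func_alt (text : String) : String :=
  String.ofList (pvScan text.toList)

-- ===== PRECONDITION & SPEC =====
def Spec_contact_replace_func (text : String) (out : String) : Prop := out = contact_replace_func_alt text
instance (text : String) (out : String) : Decidable (Spec_contact_replace_func text out) := by unfold Spec_contact_replace_func; infer_instance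

-- ===== CLAIM (what is proved, stated in full; the proofs are below) =====
def Claim_equal_contact_replace_func : Prop := ∀ (text : String), Dom_contact_replace_func text → Spec_contact_replace_func text (contact_replace_func text)

-- ===== LEMMAS AND PROOFS =====

-- clean structural model of PySem.Chars.replace for a nonempty pattern (o :: ot)
def pvRepl (o : Char) (ot new : List Char) : List Char → List Char
  | [] => []
  | c :: t =>
    if List.isPrefixOf (o :: ot) (c :: t) then
      new ++ pvRepl o ot new ((c :: t).drop (o :: ot).length)
    else
      c :: pvRepl o ot new t
  termination_by l => l.length
  decreasing_by all_goals simp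

theorem pvGo_eq (o : Char) (ot new : List Char) :
    ∀ (fuel : Nat) (l acc : List Char), l.length ≤ fuel →
      PySem.Chars.replace.go (o :: ot) new fuel l acc = acc.reverse ++ pvRepl o ot new l := by
  intro fuel
  induction fuel with
  | zero =>
      intro l acc h
      have : l = [] := List.length_eq_zero_iff.mp (Nat.le_zero.mp h)
      subst this
      simp [PySem.Chars.replace.go, pvRepl]
  | succ n ih =>
      intro l acc h
      cases l with
      | nil => simp [PySem.Chars.replace.go, pvRepl]
      | cons c t =>
          rw [show PySem.Chars.replace.go (o :: ot) new (n+1) (c :: t) acc =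
              (if (o :: ot).isPrefixOf (c :: t) = true then
                 PySem.Chars.replace.go (o :: ot) new n ((c :: t).drop (o :: ot).length) (new.reverse ++ acc)
               else PySem.Chars.replace.go (o :: ot) new n t (c :: acc)) from rfl]
          by_cases hp : (o :: ot).isPrefixOf (c :: t) = true
          · rw [if_pos hp, ih _ _ (by simp at h ⊢; omega)]
            rw [show pvRepl o ot new (c :: t) =
                new ++ pvRepl o ot new ((c :: t).drop (o :: ot).length) from by rw [pvRepl, if_pos hp]]
            simp
          · rw [if_neg hp, ih _ _ (by simp at h ⊢; omega)]
            rw [show pvRepl o ot new (c :: t) = c :: pvRepl o ot new t from by rw [pvRepl, if_neg hp]]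
            simp

theorem pvReplace_eq (o : Char) (ot new s : List Char) :
    PySem.Chars.replace s (o :: ot) new = pvRepl o ot new s := by
  rw [PySem.Chars.replace]
  simp only [List.isEmpty_cons, if_false, Bool.false_eq_true]
  simpa using pvGo_eq o ot new s.length s [] le_rfl

-- a segment containing no '<' passes unchanged through pvRepl (every pattern starts with '<')
theorem pvRepl_append_left (ot new : List Char) (s : List Char) (hs : '<' ∉ s) (l : List Char) :
    pvRepl '<' ot new (s ++ l) = s ++ pvRepl '<' ot new l := by
  induction s with
  | nil => simp
  | cons a s' ih =>
      have ha : ¬ a = '<' := fun h => hs (by simp [h])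
      have hg : List.isPrefixOf ('<' :: ot) (a :: (s' ++ l)) = false := by
        simp [List.isPrefixOf]
        intro h
        exact absurd h.symm ha
      rw [List.cons_append, pvRepl, hg]
      simp [ih (fun h => hs (List.mem_cons_of_mem _ h))]

-- the pattern at the head is replaced
theorem pvRepl_match (ot new X : List Char) :
    pvRepl '<' ot new (('<' :: ot) ++ X) = new ++ pvRepl '<' ot new X := by
  have hg : List.isPrefixOf ('<' :: ot) ('<' :: (ot ++ X)) = true :=
    List.isPrefixOf_iff_prefix.mpr (List.prefix_append _ _)
  rw [List.cons_append, pvRepl, hg]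
  simp

-- a different token at the head passes unchanged through a pvRepl pass
theorem pvRepl_tok_left (ot new tl X : List Char)
    (hg : List.isPrefixOf ('<' :: ot) ('<' :: (tl ++ X)) = false) (htl : '<' ∉ tl) :
    pvRepl '<' ot new (('<' :: tl) ++ X) = ('<' :: tl) ++ pvRepl '<' ot new X := by
  rw [List.cons_append, pvRepl, hg]
  simp [pvRepl_append_left ot new tl htl]

-- condition under which a prefix test for s is unaffected by a pvRepl pass with value v
def pvOkFor (v s : List Char) : Prop :=
  ∀ s' ∈ s.tails, s' = [] ∨ ('<' ∉ s' ∧ ¬ (s'.take v.length <+: v))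

theorem pvOkFor_tail (v : List Char) (a : Char) (s : List Char) (h : pvOkFor v (a :: s)) :
    pvOkFor v s := by
  intro s' hm
  exact h s' (by rw [List.tails_cons]; exact List.mem_cons_of_mem _ hm)

theorem pv_not_prefix_append {s v : List Char} (h : ¬ (s.take v.length <+: v)) (X : List Char) :
    ¬ s <+: (v ++ X) := by
  intro hp
  exact h (by simpa [List.take_left] using hp.take v.length)

theorem pvPrefix_pass (ot v : List Char) :
    ∀ (l s : List Char), pvOkFor v s → (s <+: pvRepl '<' ot v l ↔ s <+: l) := by
  intro l
  induction l with
  | nil => intro s _; simp [pvRepl]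
  | cons c t ih =>
      intro s hok
      cases s with
      | nil => simp
      | cons a s' =>
          have hself := hok (a :: s') (by rw [List.tails_cons]; exact List.mem_cons_self)
          rcases hself with h | ⟨hlt, htk⟩
          · exact absurd h (by simp)
          by_cases hp : List.isPrefixOf ('<' :: ot) (c :: t) = true
          · obtain ⟨z, hz⟩ := List.isPrefixOf_iff_prefix.mp hp
            rw [List.cons_append] at hz
            have hc : '<' = c := (List.cons.inj hz).1
            rw [pvRepl, if_pos hp]
            constructor
            · intro hpre; exact absurd hpre (pv_not_prefix_append htk _)
            · intro hpre
              have ha : a = '<' := (List.cons_prefix_cons.mp hpre).1.trans hc.symm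
              exact absurd (by rw [ha]; simp : '<' ∈ a :: s') hlt
          · rw [pvRepl, if_neg hp]
            rw [List.cons_prefix_cons, List.cons_prefix_cons,
                ih s' (pvOkFor_tail v a s' hok)]

-- a token prefix test passes unchanged through one pvRepl pass
theorem pvTok_pass (ot v tl : List Char) (hok : pvOkFor v tl) (c : Char) (Y : List Char) :
    (('<' :: tl) <+: c :: pvRepl '<' ot v Y) ↔ (('<' :: tl) <+: c :: Y) := by
  rw [List.cons_prefix_cons, List.cons_prefix_cons, pvPrefix_pass ot v Y tl hok]

theorem pvRepl_cons_of_not_prefix (ot new : List Char) (c : Char) (t : List Char)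
    (h : ¬ ('<' :: ot) <+: (c :: t)) :
    pvRepl '<' ot new (c :: t) = c :: pvRepl '<' ot new t := by
  rw [pvRepl, if_neg (by simpa [List.isPrefixOf_iff_prefix] using h)]

-- per-token instances (stated with the port's constants so `rw` finds them syntactically)
theorem pvMatchName (X : List Char) :
    pvRepl '<' pvTokName.tail pvValName (pvTokName ++ X)
      = pvValName ++ pvRepl '<' pvTokName.tail pvValName X := pvRepl_match _ _ _
theorem pvMatchEmail (X : List Char) :
    pvRepl '<' pvTokEmail.tail pvValEmail (pvTokEmail ++ X)
      = pvValEmail ++ pvRepl '<' pvTokEmail.tail pvValEmail X := pvRepl_match _ _ _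
theorem pvMatchSubject (X : List Char) :
    pvRepl '<' pvTokSubject.tail pvValSubject (pvTokSubject ++ X)
      = pvValSubject ++ pvRepl '<' pvTokSubject.tail pvValSubject X := pvRepl_match _ _ _
theorem pvMatchMessage (X : List Char) :
    pvRepl '<' pvTokMessage.tail pvValMessage (pvTokMessage ++ X)
      = pvValMessage ++ pvRepl '<' pvTokMessage.tail pvValMessage X := pvRepl_match _ _ _

theorem pvPass_name_email (X : List Char) :
    pvRepl '<' pvTokName.tail pvValName (pvTokEmail ++ X)
      = pvTokEmail ++ pvRepl '<' pvTokName.tail pvValName X :=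
  pvRepl_tok_left _ _ pvTokEmail.tail X (by simp [pvTokName, pvTokEmail, List.isPrefixOf]) (by decide)
theorem pvPass_name_subject (X : List Char) :
    pvRepl '<' pvTokName.tail pvValName (pvTokSubject ++ X)
      = pvTokSubject ++ pvRepl '<' pvTokName.tail pvValName X :=
  pvRepl_tok_left _ _ pvTokSubject.tail X (by simp [pvTokName, pvTokSubject, List.isPrefixOf]) (by decide)
theorem pvPass_name_message (X : List Char) :
    pvRepl '<' pvTokName.tail pvValName (pvTokMessage ++ X)
      = pvTokMessage ++ pvRepl '<' pvTokName.tail pvValName X :=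
  pvRepl_tok_left _ _ pvTokMessage.tail X (by simp [pvTokName, pvTokMessage, List.isPrefixOf]) (by decide)
theorem pvPass_email_subject (X : List Char) :
    pvRepl '<' pvTokEmail.tail pvValEmail (pvTokSubject ++ X)
      = pvTokSubject ++ pvRepl '<' pvTokEmail.tail pvValEmail X :=
  pvRepl_tok_left _ _ pvTokSubject.tail X (by simp [pvTokEmail, pvTokSubject, List.isPrefixOf]) (by decide)
theorem pvPass_email_message (X : List Char) :
    pvRepl '<' pvTokEmail.tail pvValEmail (pvTokMessage ++ X)
      = pvTokMessage ++ pvRepl '<' pvTokEmail.tail pvValEmail X :=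
  pvRepl_tok_left _ _ pvTokMessage.tail X (by simp [pvTokEmail, pvTokMessage, List.isPrefixOf]) (by decide)
theorem pvPass_subject_message (X : List Char) :
    pvRepl '<' pvTokSubject.tail pvValSubject (pvTokMessage ++ X)
      = pvTokMessage ++ pvRepl '<' pvTokSubject.tail pvValSubject X :=
  pvRepl_tok_left _ _ pvTokMessage.tail X (by simp [pvTokSubject, pvTokMessage, List.isPrefixOf]) (by decide)

-- pvScan on a token at the head
theorem pvScanName (X : List Char) : pvScan (pvTokName ++ X) = pvValName ++ pvScan X := by
  rw [show pvTokName ++ X = '<' :: (pvTokName.tail ++ X) from rfl, pvScan,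
      if_pos (show List.isPrefixOf pvTokName ('<' :: (pvTokName.tail ++ X)) = true from
        List.isPrefixOf_iff_prefix.mpr ⟨X, rfl⟩)]
  simp [pvTokName]
theorem pvScanEmail (X : List Char) : pvScan (pvTokEmail ++ X) = pvValEmail ++ pvScan X := by
  rw [show pvTokEmail ++ X = '<' :: (pvTokEmail.tail ++ X) from rfl, pvScan,
      if_neg (by simp [pvTokName, pvTokEmail, List.isPrefixOf]),
      if_pos (show List.isPrefixOf pvTokEmail ('<' :: (pvTokEmail.tail ++ X)) = true from
        List.isPrefixOf_iff_prefix.mpr ⟨X, rfl⟩)]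
  simp [pvTokEmail]
theorem pvScanSubject (X : List Char) : pvScan (pvTokSubject ++ X) = pvValSubject ++ pvScan X := by
  rw [show pvTokSubject ++ X = '<' :: (pvTokSubject.tail ++ X) from rfl, pvScan,
      if_neg (by simp [pvTokName, pvTokSubject, List.isPrefixOf]),
      if_neg (by simp [pvTokEmail, pvTokSubject, List.isPrefixOf]),
      if_pos (show List.isPrefixOf pvTokSubject ('<' :: (pvTokSubject.tail ++ X)) = true from
        List.isPrefixOf_iff_prefix.mpr ⟨X, rfl⟩)]
  simp [pvTokSubject]
theorem pvScanMessage (X : List Char) : pvScan (pvTokMessage ++ X) = pvValMessage ++ pvScan X := by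
  rw [show pvTokMessage ++ X = '<' :: (pvTokMessage.tail ++ X) from rfl, pvScan,
      if_neg (by simp [pvTokName, pvTokMessage, List.isPrefixOf]),
      if_neg (by simp [pvTokEmail, pvTokMessage, List.isPrefixOf]),
      if_neg (by simp [pvTokSubject, pvTokMessage, List.isPrefixOf]),
      if_pos (show List.isPrefixOf pvTokMessage ('<' :: (pvTokMessage.tail ++ X)) = true from
        List.isPrefixOf_iff_prefix.mpr ⟨X, rfl⟩)]
  simp [pvTokMessage]

-- A's chain of the four passes, on char lists
def pvChain (l : List Char) : List Char :=
  pvRepl '<' pvTokMessage.tail pvValMessage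
    (pvRepl '<' pvTokSubject.tail pvValSubject
      (pvRepl '<' pvTokEmail.tail pvValEmail
        (pvRepl '<' pvTokName.tail pvValName l)))

theorem pvChain_eq_scan : ∀ (n : Nat) (l : List Char), l.length ≤ n → pvChain l = pvScan l := by
  intro n
  induction n with
  | zero =>
      intro l h
      have : l = [] := List.length_eq_zero_iff.mp (Nat.le_zero.mp h)
      subst this
      simp [pvChain, pvRepl, pvScan]
  | succ n ih =>
      intro l hlen
      cases l with
      | nil => simp [pvChain, pvRepl, pvScan]
      | cons c t =>
          by_cases h1 : pvTokName <+: (c :: t)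
          · rcases h1 with ⟨X, hX⟩
            rw [← hX]
            have hXlen : X.length ≤ n := by
              have := congrArg List.length hX
              simp [pvTokName] at this; simp at hlen; omega
            rw [show pvChain (pvTokName ++ X) = pvValName ++ pvChain X from by
                  unfold pvChain
                  rw [pvMatchName, pvRepl_append_left _ _ pvValName (by decide),
                      pvRepl_append_left _ _ pvValName (by decide),
                      pvRepl_append_left _ _ pvValName (by decide)],
                pvScanName, ih X hXlen]
          by_cases h2 : pvTokEmail <+: (c :: t)
          · rcases h2 with ⟨X, hX⟩
            rw [← hX]
            have hXlen : X.length ≤ n := by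
              have := congrArg List.length hX
              simp [pvTokEmail] at this; simp at hlen; omega
            rw [show pvChain (pvTokEmail ++ X) = pvValEmail ++ pvChain X from by
                  unfold pvChain
                  rw [pvPass_name_email, pvMatchEmail,
                      pvRepl_append_left _ _ pvValEmail (by decide),
                      pvRepl_append_left _ _ pvValEmail (by decide)],
                pvScanEmail, ih X hXlen]
          by_cases h3 : pvTokSubject <+: (c :: t)
          · rcases h3 with ⟨X, hX⟩
            rw [← hX]
            have hXlen : X.length ≤ n := by
              have := congrArg List.length hX
              simp [pvTokSubject] at this; simp at hlen; omega
            rw [show pvChain (pvTokSubject ++ X) = pvValSubject ++ pvChain X from by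
                  unfold pvChain
                  rw [pvPass_name_subject, pvPass_email_subject, pvMatchSubject,
                      pvRepl_append_left _ _ pvValSubject (by decide)],
                pvScanSubject, ih X hXlen]
          by_cases h4 : pvTokMessage <+: (c :: t)
          · rcases h4 with ⟨X, hX⟩
            rw [← hX]
            have hXlen : X.length ≤ n := by
              have := congrArg List.length hX
              simp [pvTokMessage] at this; simp at hlen; omega
            rw [show pvChain (pvTokMessage ++ X) = pvValMessage ++ pvChain X from by
                  unfold pvChain
                  rw [pvPass_name_message, pvPass_email_message, pvPass_subject_message,
                      pvMatchMessage],
                pvScanMessage, ih X hXlen]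
          · -- no token matches here: the char is copied by every pass and by the scan
            have htlen : t.length ≤ n := by simp at hlen; omega
            have e1 := pvRepl_cons_of_not_prefix pvTokName.tail pvValName c t h1
            have g2 : ¬ pvTokEmail <+: (c :: pvRepl '<' pvTokName.tail pvValName t) := by
              rw [show (pvTokEmail : List Char) = '<' :: pvTokEmail.tail from rfl] at h2 ⊢
              rw [pvTok_pass _ _ _ (by unfold pvOkFor; decide)]; exact h2
            have e2 := pvRepl_cons_of_not_prefix pvTokEmail.tail pvValEmail c _ g2
            have g3 : ¬ pvTokSubject <+: (c :: pvRepl '<' pvTokEmail.tail pvValEmail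
                (pvRepl '<' pvTokName.tail pvValName t)) := by
              rw [show (pvTokSubject : List Char) = '<' :: pvTokSubject.tail from rfl] at h3 ⊢
              rw [pvTok_pass _ _ _ (by unfold pvOkFor; decide), pvTok_pass _ _ _ (by unfold pvOkFor; decide)]; exact h3
            have e3 := pvRepl_cons_of_not_prefix pvTokSubject.tail pvValSubject c _ g3
            have g4 : ¬ pvTokMessage <+: (c :: pvRepl '<' pvTokSubject.tail pvValSubject
                (pvRepl '<' pvTokEmail.tail pvValEmail (pvRepl '<' pvTokName.tail pvValName t))) := by
              rw [show (pvTokMessage : List Char) = '<' :: pvTokMessage.tail from rfl] at h4 ⊢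
              rw [pvTok_pass _ _ _ (by unfold pvOkFor; decide), pvTok_pass _ _ _ (by unfold pvOkFor; decide),
                  pvTok_pass _ _ _ (by unfold pvOkFor; decide)]; exact h4
            have e4 := pvRepl_cons_of_not_prefix pvTokMessage.tail pvValMessage c _ g4
            rw [show pvChain (c :: t) = c :: pvChain t from by
                  unfold pvChain; rw [e1, e2, e3, e4],
                show pvScan (c :: t) = c :: pvScan t from by
                  rw [pvScan,
                      if_neg (by simpa [List.isPrefixOf_iff_prefix] using h1),
                      if_neg (by simpa [List.isPrefixOf_iff_prefix] using h2),
                      if_neg (by simpa [List.isPrefixOf_iff_prefix] using h3),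
                      if_neg (by simpa [List.isPrefixOf_iff_prefix] using h4)],
                ih t htlen]

-- the four Str.replace stages of port A, rewritten through pvRepl
theorem pvStage_name (s : String) : PySem.Str.replace s "<name>" "John Doe"
    = String.ofList (pvRepl '<' pvTokName.tail pvValName s.toList) := by
  rw [PySem.Str.replace, show ("<name>".toList : List Char) = '<' :: pvTokName.tail from rfl,
      pvReplace_eq]; rfl
theorem pvStage_email (s : String) : PySem.Str.replace s "<email>" "johndoe@example.com"
    = String.ofList (pvRepl '<' pvTokEmail.tail pvValEmail s.toList) := by
  rw [PySem.Str.replace, show ("<email>".toList : List Char) = '<' :: pvTokEmail.tail from rfl,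
      pvReplace_eq]; rfl
theorem pvStage_subject (s : String) : PySem.Str.replace s "<subject>" "Inquiry about services"
    = String.ofList (pvRepl '<' pvTokSubject.tail pvValSubject s.toList) := by
  rw [PySem.Str.replace, show ("<subject>".toList : List Char) = '<' :: pvTokSubject.tail from rfl,
      pvReplace_eq]; rfl
theorem pvStage_message (s : String) : PySem.Str.replace s "<message>"
      "I would like more details about your offerings. Please get back to me soon."
    = String.ofList (pvRepl '<' pvTokMessage.tail pvValMessage s.toList) := by
  rw [PySem.Str.replace, show ("<message>".toList : List Char) = '<' :: pvTokMessage.tail from rfl,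
      pvReplace_eq]; rfl

-- ===== VERDICT (by name: the statement is the Claim_ definition above) =====
theorem contact_replace_func_spec : Claim_equal_contact_replace_func := by
  intro text _
  unfold Spec_contact_replace_func contact_replace_func contact_replace_func_alt
  simp only [pvStage_name, pvStage_email, pvStage_subject, pvStage_message,
    String.toList_ofList]
  rw [show pvRepl '<' pvTokMessage.tail pvValMessage
        (pvRepl '<' pvTokSubject.tail pvValSubject
          (pvRepl '<' pvTokEmail.tail pvValEmail
            (pvRepl '<' pvTokName.tail pvValName text.toList))) = pvChain text.toList from rfl,
      pvChain_eq_scan text.toList.length text.toList le_rfl]
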